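-- pv_equiv track=rewrite | github.com/bhj8286/algo | programmers/가장큰수찾기/sol.py | solution
-- ===== SOURCE A (Python) =====
-- def solution(array):
--     answer = []
--     max_num = 0
--     for i in range(len(array)):
--         if array[i] > max_num:
--             max_num = array[i]
--             answer = [array[i], i]
--         else:
--             continue
--
--     return answer
-- ===== SOURCE B (Python) =====
-- def solution(array):
--     m = max(array, default=0)
--     if m > 0:
--         return [m, array.index(m)]
--     return []
-- ===== Notes on version B (the rewrite author's own statement) =====
-- stated objective: simpler
-- what changed: Replaces A's fused index loop that tracks a running max and answer pair with two builtin passes: max(array, default=0) to get the value, then array.index(m) to locate its first occurrence, guarded by m > 0.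
import Mathlib
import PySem

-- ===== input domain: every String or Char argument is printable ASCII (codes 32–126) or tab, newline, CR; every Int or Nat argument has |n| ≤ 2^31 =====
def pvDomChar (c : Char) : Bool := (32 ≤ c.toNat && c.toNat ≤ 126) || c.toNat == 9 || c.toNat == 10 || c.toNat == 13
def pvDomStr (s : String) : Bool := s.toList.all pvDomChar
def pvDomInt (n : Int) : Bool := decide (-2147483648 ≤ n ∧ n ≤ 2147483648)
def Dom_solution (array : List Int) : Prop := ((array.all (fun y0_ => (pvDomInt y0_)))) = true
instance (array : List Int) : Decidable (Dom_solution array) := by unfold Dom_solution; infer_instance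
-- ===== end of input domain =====

-- B computes the max in one builtin pass and locates its first index in a second pass
-- (simpler decomposition); A fuses both into one index loop with a running (answer, max) state.

-- ===== PORT A =====
-- for i in range(len(array)): array[i] is read with i always in range (pyGetD is exact there)
def solution (array : List Int) : List Int :=
  ((PySem.List.pyRange 0 (array.length : Int) 1).foldl
    (fun (st : List Int × Int) i =>
      let x := PySem.List.pyGetD array i 0
      if x > st.2 then ([x, i], x) else st)
    ([], 0)).1

-- ===== PORT B =====
-- m = max(array, default=0); array.index(m) always succeeds there (m ∈ array when m > 0),
-- so the .getD 0 default is never used.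
def solution_alt (array : List Int) : List Int :=
  let m := (PySem.List.max? array (fun y => y)).getD 0
  if m > 0 then [m, (((PySem.List.index? array m).getD 0 : Nat) : Int)] else []

-- ===== PRECONDITION & SPEC =====
def Spec_solution (array : List Int) (out : List Int) : Prop := out = solution_alt array
instance (array : List Int) (out : List Int) : Decidable (Spec_solution array out) := by unfold Spec_solution; infer_instance

-- ===== CLAIM (what is proved, stated in full; the proofs are below) =====
def Claim_equal_solution : Prop := ∀ (array : List Int), Dom_solution array → Spec_solution array (solution array)

-- ===== LEMMAS AND PROOFS =====

theorem foldl_max_comm (t : List Int) : ∀ (a b : Int), t.foldl max (max a b) = max a (t.foldl max b) := by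
  induction t with
  | nil => intro a b; rfl
  | cons h tl ih =>
    intro a b
    simp only [List.foldl_cons]
    rw [max_assoc, ih]

/-- A's loop, rephrased over `enumerate`, computes B's answer together with the running max. -/
theorem loop_char (l : List Int) :
    (PySem.List.enumerate l 0).foldl
      (fun (st : List Int × Int) p => if p.2 > st.2 then ([p.2, p.1], p.2) else st)
      (([] : List Int), (0 : Int))
    = ((if l.foldl max 0 > 0 then
          [l.foldl max 0, (((PySem.List.index? l (l.foldl max 0)).getD 0 : Nat) : Int)]
        else []), l.foldl max 0) := by
  induction l using List.reverseRecOn with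
  | nil => simp [PySem.List.enumerate]
  | append_singleton l x ih =>
    have hc := PySem.List.le_foldl_max l 0
    set c := l.foldl max 0 with hcdef
    have hmax : (l ++ [x]).foldl max 0 = max c x := by
      rw [List.foldl_append]; rfl
    rw [PySem.List.enumerate_append, List.foldl_append, ih, hmax]
    simp only [PySem.List.enumerate, List.foldl_cons, List.foldl_nil]
    by_cases hx : x > c
    · have hnotmem : x ∉ l := fun hm => absurd (hc.2 x hm) (not_le.mpr hx)
      have hmx : max c x = x := max_eq_right (le_of_lt hx)
      have hxpos : x > 0 := lt_of_le_of_lt hc.1 hx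
      rw [hmx, PySem.List.index?_append_singleton_self l x hnotmem]
      simp [hx, hxpos]
    · have hmx : max c x = c := max_eq_left (not_lt.mp hx)
      rw [hmx]
      by_cases hcpos : c > 0
      · have hmem : c ∈ l := by
          rcases PySem.List.foldl_max_mem l 0 with h0 | hm
          · rw [hcdef] at hcpos; omega
          · exact hm
        rw [PySem.List.index?_append_of_mem _ hmem]
        simp [hx, hcpos]
      · simp [hx, hcpos]

theorem solution_eq_loop (array : List Int) :
    solution array
    = ((PySem.List.enumerate array 0).foldl
        (fun (st : List Int × Int) p => if p.2 > st.2 then ([p.2, p.1], p.2) else st)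
        (([] : List Int), (0 : Int))).1 := by
  rw [PySem.List.enumerate_eq_map_pyRange array (0 : Int), List.foldl_map]
  rfl

-- ===== VERDICT (by name: the statement is the Claim_ definition above) =====
theorem solution_spec : Claim_equal_solution := by
  intro array _
  unfold Spec_solution
  rw [solution_eq_loop, loop_char]
  cases array with
  | nil => simp [solution_alt, PySem.List.max?]
  | cons x t =>
    have hm : PySem.List.max? (x :: t) (fun y => y) = some (t.foldl max x) :=
      PySem.List.max?_id_cons x t
    have hfold : (x :: t).foldl max 0 = max 0 (t.foldl max x) := by
      simp only [List.foldl_cons]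
      exact foldl_max_comm t 0 x
    unfold solution_alt
    rw [hm, hfold]
    by_cases hpos : t.foldl max x > 0
    · have : max 0 (t.foldl max x) = t.foldl max x := max_eq_right (le_of_lt hpos)
      simp [this, hpos]
    · have : max 0 (t.foldl max x) = 0 := max_eq_left (not_lt.mp hpos)
      simp [this, hpos]
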